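-- pv_equiv track=rewrite | github.com/CellixJs/cellixjs | .github/hooks/reconcile-agent-result.py | find_agent_in_text
-- ===== SOURCE A (Python) =====
-- KNOWN_AGENTS = [
--     "planner",
--     "implementor",
--     "reviewer",
--     "framework-surface-reviewer",
--     "validator",
--     "security",
--     "orchestrator",
-- ]
--
-- AGENT_ALIASES = {
--     "discovery-planner": "planner",
--     "implementer": "implementor",
--     "implementer-research": "implementor",
--     "implementation-engineer": "implementor",
--     "qa-reviewer": "reviewer",
-- }
--
-- def normalize(value: object) -> str:
--     return str(value).strip().lower()
--
-- def find_agent_in_text(value: str) -> str: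
--     text = normalize(value)
--     if not text:
--         return ""
--     matches = []
--     for agent in KNOWN_AGENTS:
--         pos = text.find(agent)
--         if pos >= 0:
--             matches.append((pos, agent))
--     for alias, canonical in AGENT_ALIASES.items():
--         pos = text.find(alias)
--         if pos >= 0:
--             matches.append((pos, canonical))
--     matches.sort()
--     return matches[0][1] if matches else ""
-- ===== SOURCE B (Python) =====
-- KNOWN_AGENTS = [
--     "planner",
--     "implementor",
--     "reviewer",
--     "framework-surface-reviewer",
--     "validator",
--     "security",
--     "orchestrator",
-- ]
--
-- AGENT_ALIASES = {
--     "discovery-planner": "planner",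
--     "implementer": "implementor",
--     "implementer-research": "implementor",
--     "implementation-engineer": "implementor",
--     "qa-reviewer": "reviewer",
-- }
--
--
-- def find_agent_in_text(value: str) -> str:
--     # Scan the text position by position (instead of one find() per pattern):
--     # at the first position where any known name or alias starts, return the
--     # smallest canonical name starting there.
--     text = str(value).strip().lower()
--     vocab = [(a, a) for a in KNOWN_AGENTS] + list(AGENT_ALIASES.items())
--     for i in range(len(text)):
--         cands = [canon for name, canon in vocab if text.startswith(name, i)]
--         if cands:
--             return min(cands)
--     return ""
-- ===== Notes on version B (the rewrite author's own statement) =====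
-- stated objective: alternative
-- what changed: Instead of running find() once per pattern, collecting (pos, canonical) pairs and sorting them, B scans the text left to right position by position and at the first position where any known name or alias starts returns the smallest canonical name starting there.
import Mathlib
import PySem

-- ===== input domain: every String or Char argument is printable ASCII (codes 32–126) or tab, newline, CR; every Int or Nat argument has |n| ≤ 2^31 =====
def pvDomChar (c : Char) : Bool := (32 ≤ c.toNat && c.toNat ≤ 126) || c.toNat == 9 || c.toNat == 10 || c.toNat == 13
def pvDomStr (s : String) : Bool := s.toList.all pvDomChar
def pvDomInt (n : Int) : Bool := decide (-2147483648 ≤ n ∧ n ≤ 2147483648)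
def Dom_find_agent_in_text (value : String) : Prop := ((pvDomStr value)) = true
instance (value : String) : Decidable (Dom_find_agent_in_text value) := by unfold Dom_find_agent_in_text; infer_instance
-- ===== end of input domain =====

-- B replaces A's per-pattern find/collect/sort pipeline by a left-to-right scan of the TEXT:
-- at the first position where any known name or alias starts it returns the smallest canonical
-- name starting there; objective: alternative (text-driven scan instead of pattern-driven finds).

-- ===== PORT A =====
def pvKnownAgents : List String :=
  ["planner", "implementor", "reviewer", "framework-surface-reviewer",
   "validator", "security", "orchestrator"]

-- AGENT_ALIASES (a dict) as an association list in insertion order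
def pvAgentAliases : List (String × String) :=
  [("discovery-planner", "planner"), ("implementer", "implementor"),
   ("implementer-research", "implementor"), ("implementation-engineer", "implementor"),
   ("qa-reviewer", "reviewer")]

def find_agent_in_text (value : String) : String :=
  let text := PySem.Str.lower (PySem.Str.strip value)
  if text = "" then ""
  else
    let matches1 := pvKnownAgents.foldl (fun ms agent =>
      if 0 ≤ PySem.Str.find text agent then ms ++ [(PySem.Str.find text agent, agent)] else ms) []
    let matches2 := pvAgentAliases.foldl (fun ms ac =>
      if 0 ≤ PySem.Str.find text ac.1 then ms ++ [(PySem.Str.find text ac.1, ac.2)] else ms) matches1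
    match PySem.List.sorted2 matches2 (fun m => m.1) (fun m => m.2) with
    | [] => ""
    | m :: _ => m.2

-- ===== PORT B =====
-- vocab = [(a, a) for a in KNOWN_AGENTS] + list(AGENT_ALIASES.items())
def pvVocab : List (String × String) :=
  pvKnownAgents.map (fun a => (a, a)) ++ pvAgentAliases

-- [canon for name, canon in vocab if text.startswith(name, i)]
-- (text.startswith(name, i) with 0 ≤ i is exactly a prefix test on text[i:], i.e. on text.drop i)
def pvCandsAt (text : List Char) (i : Nat) : List String :=
  pvVocab.filterMap (fun nc =>
    if PySem.Chars.startswith (List.drop i text) nc.1.toList then some nc.2 else none)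

-- the 'for i in range(len(text)): … if cands: return min(cands)' loop, with its early return
def pvScanB (text : List Char) : List Nat → String
  | [] => ""
  | i :: rest =>
    let cands := pvCandsAt text i
    if cands.isEmpty then pvScanB text rest
    else (PySem.List.min? cands (fun x => x)).getD ""   -- cands ≠ [] here, so min? is some

def find_agent_in_text_alt (value : String) : String :=
  let text := (PySem.Str.lower (PySem.Str.strip value)).toList
  pvScanB text (List.range text.length)

-- ===== PRECONDITION & SPEC =====
def Spec_find_agent_in_text (value : String) (out : String) : Prop := out = find_agent_in_text_alt value
instance (value : String) (out : String) : Decidable (Spec_find_agent_in_text value out) := by unfold Spec_find_agent_in_text; infer_instance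

-- ===== CLAIM (what is proved, stated in full; the proofs are below) =====
def Claim_equal_find_agent_in_text : Prop := ∀ (value : String), Dom_find_agent_in_text value → Spec_find_agent_in_text value (find_agent_in_text value)

-- ===== LEMMAS AND PROOFS =====

-- the lexicographic "is strictly smaller" comparison on (position, name) pairs (= sorted2's order)
def pvBefore (a b : Int × String) : Bool :=
  decide (a.1 < b.1) || !decide (b.1 < a.1) && decide (a.2 < b.2)

-- one step of a running lexicographic minimum (what insertion sort's head computes)
def pvStep (ob : Option (Int × String)) (x : Int × String) : Option (Int × String) :=
  match ob with
  | none => some x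
  | some b => if pvBefore x b then some x else some b

-- lexicographic ≤ on (position, name) pairs
def pvLexLE (a b : Int × String) : Prop := a.1 < b.1 ∨ (a.1 = b.1 ∧ a.2 ≤ b.2)

-- A's matches list, as a filter of the combined vocabulary (on the Chars side)
def pvM (t : List Char) : List (Int × String) :=
  (pvVocab.filter (fun nc => decide (0 ≤ PySem.Chars.find t nc.1.toList))).map
    (fun nc => (PySem.Chars.find t nc.1.toList, nc.2))

theorem pvBefore_iff (a b : Int × String) :
    pvBefore a b = true ↔ (a.1 < b.1 ∨ (a.1 = b.1 ∧ a.2 < b.2)) := by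
  unfold pvBefore
  rcases lt_trichotomy a.1 b.1 with h | h | h <;>
    simp [h, not_lt_of_gt]
  omega

theorem pvLexLE_trans (a b c : Int × String) (h1 : pvLexLE a b) (h2 : pvLexLE b c) :
    pvLexLE a c := by
  rcases h1 with h1 | ⟨h1, h1'⟩ <;> rcases h2 with h2 | ⟨h2, h2'⟩
  · exact Or.inl (lt_trans h1 h2)
  · exact Or.inl (by omega)
  · exact Or.inl (by omega)
  · exact Or.inr ⟨by omega, le_trans h1' h2'⟩

theorem before_imp (x b : Int × String) (h : pvBefore x b = true) : pvLexLE x b := by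
  rcases (pvBefore_iff x b).mp h with h1 | ⟨h1, h2⟩
  · exact Or.inl h1
  · exact Or.inr ⟨h1, le_of_lt h2⟩

theorem not_before_imp (x b : Int × String) (h : ¬ pvBefore x b = true) : pvLexLE b x := by
  have h' : ¬ (x.1 < b.1 ∨ (x.1 = b.1 ∧ x.2 < b.2)) := fun hc => h ((pvBefore_iff x b).mpr hc)
  push_neg at h'
  rcases lt_trichotomy b.1 x.1 with h1 | h1 | h1
  · exact Or.inl h1
  · exact Or.inr ⟨h1, h'.2 h1.symm⟩
  · exact absurd h1 (not_lt.mpr h'.1)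

theorem head?_insertBy (x : Int × String) (acc : List (Int × String)) :
    (PySem.List.insertBy pvBefore x acc).head? = pvStep acc.head? x := by
  cases acc with
  | nil => rfl
  | cons y ys =>
    simp only [PySem.List.insertBy, pvStep, List.head?]
    by_cases h : pvBefore x y = true
    · simp [h]
    · simp [h]

theorem head?_foldl_insertBy (l : List (Int × String)) (acc : List (Int × String)) :
    (l.foldl (fun a x => PySem.List.insertBy pvBefore x a) acc).head? =
      l.foldl pvStep acc.head? := by
  induction l generalizing acc with
  | nil => rfl
  | cons x t ih => simp only [List.foldl_cons, ih, head?_insertBy]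

-- an "if p(x): out.append(f(x))" loop with a Prop-valued test
theorem foldl_append_if_prop {α β : Type} (p : α → Prop) [DecidablePred p] (f : α → β)
    (l : List α) (acc : List β) :
    l.foldl (fun acc x => if p x then acc ++ [f x] else acc) acc =
      acc ++ (l.filter (fun x => decide (p x))).map f := by
  induction l generalizing acc with
  | nil => simp
  | cons x t ih =>
    simp only [List.foldl_cons, List.filter_cons]
    by_cases h : p x
    · simp [h, ih]
    · simp [h, ih]

-- A's two append loops build exactly the filtered-mapped combined vocabulary
theorem matches_loop_eq (text : String) :
    (pvAgentAliases.foldl (fun ms ac =>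
        if 0 ≤ PySem.Str.find text ac.1 then ms ++ [(PySem.Str.find text ac.1, ac.2)] else ms)
      (pvKnownAgents.foldl (fun ms agent =>
        if 0 ≤ PySem.Str.find text agent then ms ++ [(PySem.Str.find text agent, agent)] else ms) [])) =
    pvM text.toList := by
  rw [foldl_append_if_prop (p := fun agent : String => 0 ≤ PySem.Str.find text agent)
        (f := fun agent : String => (PySem.Str.find text agent, agent)),
      foldl_append_if_prop (p := fun ac : String × String => 0 ≤ PySem.Str.find text ac.1)
        (f := fun ac : String × String => (PySem.Str.find text ac.1, ac.2)) pvAgentAliases]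
  simp [pvM, pvVocab, List.filter_map, List.map_map, Function.comp_def, PySem.Str.find_eq]
  rfl

-- the running-minimum fold: its result is a member and a lexicographic lower bound
theorem foldl_pvStep_some (l : List (Int × String)) (b : Int × String) :
    ∃ m, l.foldl pvStep (some b) = some m ∧ (m = b ∨ m ∈ l) ∧ pvLexLE m b ∧
      ∀ x ∈ l, pvLexLE m x := by
  induction l generalizing b with
  | nil => exact ⟨b, rfl, Or.inl rfl, Or.inr ⟨rfl, le_refl _⟩, by simp⟩
  | cons x t ih =>
    simp only [List.foldl_cons]
    by_cases h : pvBefore x b = true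
    · obtain ⟨m, hm, hmem, hle, hall⟩ := ih x
      refine ⟨m, by simpa [pvStep, h] using hm, ?_, ?_, ?_⟩
      · rcases hmem with rfl | hmem
        · exact Or.inr List.mem_cons_self
        · exact Or.inr (List.mem_cons_of_mem _ hmem)
      · exact pvLexLE_trans m x b hle (before_imp x b h)
      · intro y hy
        rcases List.mem_cons.mp hy with rfl | hy
        · exact hle
        · exact hall y hy
    · obtain ⟨m, hm, hmem, hle, hall⟩ := ih b
      refine ⟨m, by simpa [pvStep, h] using hm, ?_, hle, ?_⟩
      · rcases hmem with rfl | hmem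
        · exact Or.inl rfl
        · exact Or.inr (List.mem_cons_of_mem _ hmem)
      · intro y hy
        rcases List.mem_cons.mp hy with rfl | hy
        · exact pvLexLE_trans m b y hle (not_before_imp y b h)
        · exact hall y hy

-- every vocabulary name is nonempty
theorem pvVocab_names_ne_nil : ∀ nc ∈ pvVocab, nc.1.toList ≠ [] := by decide

-- membership in B's candidate list at position i
theorem mem_pvCandsAt (t : List Char) (i : Nat) (c : String) :
    c ∈ pvCandsAt t i ↔ ∃ nc ∈ pvVocab, nc.1.toList <+: List.drop i t ∧ nc.2 = c := by
  simp only [pvCandsAt, List.mem_filterMap, Option.ite_none_right_eq_some, Option.some.injEq,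
    PySem.Chars.startswith_iff]

-- membership in A's matches list
theorem mem_pvM (t : List Char) (m : Int × String) :
    m ∈ pvM t ↔ ∃ nc ∈ pvVocab, 0 ≤ PySem.Chars.find t nc.1.toList ∧
      (PySem.Chars.find t nc.1.toList, nc.2) = m := by
  simp only [pvM, List.mem_map, List.mem_filter, decide_eq_true_eq]
  constructor
  · rintro ⟨a, ⟨ha, hnn⟩, h1⟩; exact ⟨a, ha, hnn, h1⟩
  · rintro ⟨a, ha, hnn, h1⟩; exact ⟨a, ⟨ha, hnn⟩, h1⟩

-- if a name is a prefix at position j, its find is at most j (and it occurs)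
theorem find_le_of_prefix (t sub : List Char) (j : Nat) (h : sub <+: List.drop j t) :
    0 ≤ PySem.Chars.find t sub ∧ (PySem.Chars.find t sub).toNat ≤ j := by
  have hin : 0 ≤ PySem.Chars.find t sub := by
    rw [PySem.Chars.find_nonneg_iff, ← PySem.Chars.isIn_iff_infix,
      ← PySem.Chars.exists_prefix_drop_iff_isIn]
    exact ⟨j, h⟩
  refine ⟨hin, ?_⟩
  by_contra hc
  exact (PySem.Chars.find_spec hin).2 j (by omega) h

-- the core: the position scan computes the tail of the lexicographic minimum of pvM
theorem scan_aux (t : List Char) (k i : Nat) (hik : i + k = t.length)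
    (hno : ∀ nc ∈ pvVocab, ∀ j, j < i → ¬ nc.1.toList <+: List.drop j t) :
    pvScanB t (List.range' i k) =
      (match (pvM t).foldl pvStep none with | none => "" | some b => b.2) := by
  induction k generalizing i with
  | zero =>
    -- i = t.length: no name occurs anywhere, so pvM t = []
    have hM : pvM t = [] := by
      rw [pvM, List.map_eq_nil_iff, List.filter_eq_nil_iff]
      intro nc hnc
      simp only [decide_eq_true_eq, not_le]
      by_contra hc
      push_neg at hc
      rw [PySem.Chars.find_nonneg_iff, ← PySem.Chars.isIn_iff_infix,
        ← PySem.Chars.exists_prefix_drop_iff_isIn] at hc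
      obtain ⟨j, hj⟩ := hc
      by_cases hji : j < i
      · exact hno nc hnc j hji hj
      · have hnil : List.drop j t = [] := List.drop_eq_nil_of_le (by omega)
        rw [hnil, List.prefix_nil] at hj
        exact pvVocab_names_ne_nil nc hnc hj
    rw [hM]
    rfl
  | succ k ih =>
    rw [List.range'_succ]
    simp only [pvScanB]
    by_cases hc : (pvCandsAt t i).isEmpty
    · rw [if_pos hc]
      refine ih (i + 1) (by omega) ?_
      intro nc hnc j hj hpre
      by_cases hji : j < i
      · exact hno nc hnc j hji hpre
      · have hji' : j = i := by omega
        subst hji'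
        have hm : nc.2 ∈ pvCandsAt t j := (mem_pvCandsAt t j nc.2).mpr ⟨nc, hnc, hpre, rfl⟩
        rw [List.isEmpty_iff] at hc
        rw [hc] at hm
        exact absurd hm (List.not_mem_nil)
    · rw [if_neg hc]
      rw [List.isEmpty_iff] at hc
      -- the candidate list is nonempty; let mc be its minimum
      obtain ⟨mc, hmc⟩ : ∃ mc, PySem.List.min? (pvCandsAt t i) (fun x => x) = some mc := by
        cases hmin : PySem.List.min? (pvCandsAt t i) (fun x => x) with
        | none => exact absurd ((PySem.List.min?_eq_none_iff _ _).mp hmin) hc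
        | some m => exact ⟨m, rfl⟩
      have hmem := PySem.List.min?_mem hmc
      have hmin := PySem.List.min?_isMin hmc
      -- a name with canonical mc prefixes at i …
      obtain ⟨nc0, hnc0, hpre0, hc0⟩ := (mem_pvCandsAt t i mc).mp hmem
      -- … and any name prefixing at i has find = i (no occurrence before i)
      have hfind_at : ∀ nc ∈ pvVocab, nc.1.toList <+: List.drop i t →
          PySem.Chars.find t nc.1.toList = (i : Int) := by
        intro nc hnc hpre
        obtain ⟨hnn, hle⟩ := find_le_of_prefix t nc.1.toList i hpre
        have hge : ¬ (PySem.Chars.find t nc.1.toList).toNat < i := fun hlt =>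
          hno nc hnc _ hlt (PySem.Chars.find_spec hnn).1
        omega
      -- any matched name has find ≥ i
      have hfind_ge : ∀ nc ∈ pvVocab, 0 ≤ PySem.Chars.find t nc.1.toList →
          (i : Int) ≤ PySem.Chars.find t nc.1.toList := by
        intro nc hnc hnn
        have hge : ¬ (PySem.Chars.find t nc.1.toList).toNat < i := fun hlt =>
          hno nc hnc _ hlt (PySem.Chars.find_spec hnn).1
        omega
      have hiM : ((i : Int), mc) ∈ pvM t := (mem_pvM t ((i : Int), mc)).mpr
        ⟨nc0, hnc0, by rw [hfind_at nc0 hnc0 hpre0]; exact Int.natCast_nonneg i,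
         by rw [hfind_at nc0 hnc0 hpre0, hc0]⟩
      -- pvM t is nonempty, so its fold is some m, a member and a lower bound
      obtain ⟨x, l, hxl⟩ : ∃ x l, pvM t = x :: l := by
        cases hM : pvM t with
        | nil => rw [hM] at hiM; exact absurd hiM (List.not_mem_nil)
        | cons x l => exact ⟨x, l, rfl⟩
      obtain ⟨m, hm, hmemM, hlehead, hall⟩ := foldl_pvStep_some l x
      have hfold : (pvM t).foldl pvStep none = some m := by
        rw [hxl]; exact hm
      have hmemM' : m ∈ pvM t := by
        rw [hxl]
        rcases hmemM with rfl | hmm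
        · exact List.mem_cons_self
        · exact List.mem_cons_of_mem _ hmm
      have hallM : ∀ y ∈ pvM t, pvLexLE m y := by
        intro y hy
        rw [hxl] at hy
        rcases List.mem_cons.mp hy with rfl | hy
        · exact hlehead
        · exact hall y hy
      -- pin down m = (i, mc)
      obtain ⟨ncm, hncm, hnnm, hme⟩ := (mem_pvM t m).mp hmemM'
      have hm1_ge : (i : Int) ≤ m.1 := by
        rw [← hme]; exact hfind_ge ncm hncm hnnm
      have hle_imc : pvLexLE m ((i : Int), mc) := hallM _ hiM
      have hm1 : m.1 = (i : Int) := by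
        rcases hle_imc with h1 | ⟨h1, _⟩
        · exact le_antisymm (le_of_lt h1) hm1_ge
        · exact h1
      -- m's name prefixes at i, so m.2 is a candidate and mc ≤ m.2
      have hfm : PySem.Chars.find t ncm.1.toList = (i : Int) := by
        rw [← hm1, ← hme]
      have hprem : ncm.1.toList <+: List.drop i t := by
        have hsp := (PySem.Chars.find_spec hnnm).1
        rw [hfm] at hsp
        simpa using hsp
      have hm2cand : m.2 ∈ pvCandsAt t i := (mem_pvCandsAt t i m.2).mpr
        ⟨ncm, hncm, hprem, by rw [← hme]⟩
      have h1 : mc ≤ m.2 := hmin m.2 hm2cand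
      have h2 : m.2 ≤ mc := by
        rcases hle_imc with hlt | ⟨_, hle⟩
        · exact absurd hlt (by omega)
        · exact hle
      have hm2 : m.2 = mc := le_antisymm h2 h1
      rw [hfold, hmc]
      simpa using hm2.symm

-- A's whole body, rewritten to the fold-min of pvM
theorem a_eq_fold (value : String) :
    find_agent_in_text value =
      (match (pvM (PySem.Str.lower (PySem.Str.strip value)).toList).foldl pvStep none with
       | none => "" | some b => b.2) := by
  unfold find_agent_in_text
  set text := PySem.Str.lower (PySem.Str.strip value) with htext
  by_cases h : text = ""
  · rw [if_pos h]
    have hM : pvM text.toList = [] := by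
      rw [h]
      decide
    rw [hM]
    rfl
  · rw [if_neg h]
    simp only [matches_loop_eq text]
    have hh := head?_foldl_insertBy (pvM text.toList) []
    have hs : PySem.List.sorted2 (pvM text.toList) (fun m => m.1) (fun m => m.2) =
        (pvM text.toList).foldl (fun a x => PySem.List.insertBy pvBefore x a) [] := rfl
    rw [← hs] at hh
    simp only [List.head?_nil] at hh
    cases hsort : PySem.List.sorted2 (pvM text.toList) (fun m => m.1) (fun m => m.2) with
    | nil =>
      rw [hsort] at hh
      simp only [List.head?_nil] at hh
      rw [← hh]
    | cons x rest =>
      rw [hsort] at hh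
      simp only [List.head?_cons] at hh
      rw [← hh]

-- ===== VERDICT (by name: the statement is the Claim_ definition above) =====
theorem find_agent_in_text_spec : Claim_equal_find_agent_in_text := by
  intro value _
  show find_agent_in_text value = find_agent_in_text_alt value
  rw [a_eq_fold value]
  simp only [find_agent_in_text_alt]
  rw [List.range_eq_range']
  exact (scan_aux (PySem.Str.lower (PySem.Str.strip value)).toList _ 0 (by omega)
    (by intro nc hnc j hj; omega)).symm
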